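-- pv_equiv track=rewrite | github.com/djkostyan4ik/pp1 | 12-Test3/mock 3.3/p1.py | f
-- ===== SOURCE A (Python) =====
-- def f(n):
--     i = 5
--     result = []
--     if n <= 0:
--         return ''
--     else:
--         result += str(n * '/')
--     while i < len(result):
--         result.insert(i,'-')
--         i += 6
--     return ''.join(result)
-- ===== SOURCE B (Python) =====
-- def f(n):
--     if n <= 0:
--         return ''
--     chunks = []
--     while n > 5:
--         chunks.append('/////')
--         n -= 5
--     chunks.append('/' * n)
--     return '-'.join(chunks)
-- ===== Notes on version B (the rewrite author's own statement) =====
-- stated objective: faster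
-- what changed: A builds a char list and simulates dash insertions into it with shifting indices (each insert shifts the tail); B accumulates fixed '/////' chunks plus a remainder chunk and joins them once with '-'.
import Mathlib
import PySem

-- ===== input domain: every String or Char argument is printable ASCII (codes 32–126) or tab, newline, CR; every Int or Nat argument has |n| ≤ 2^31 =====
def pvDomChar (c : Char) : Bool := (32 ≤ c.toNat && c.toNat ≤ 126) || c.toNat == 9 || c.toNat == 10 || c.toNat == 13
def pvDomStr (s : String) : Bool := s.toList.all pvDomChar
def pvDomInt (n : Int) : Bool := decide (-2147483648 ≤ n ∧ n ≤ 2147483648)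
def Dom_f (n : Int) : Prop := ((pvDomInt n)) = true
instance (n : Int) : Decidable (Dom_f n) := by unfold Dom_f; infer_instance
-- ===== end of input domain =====

-- B replaces A's simulation of '-'-insertions into a growing list (with shifting
-- indices) by accumulating fixed '/////'-chunks plus a remainder and joining them once.

-- ===== PORT A =====
-- the while loop: insert '-' at index i, i += 6, while i < len(result)
def fLoopA (i : Nat) (result : List Char) : List Char :=
  if i < result.length then fLoopA (i + 6) (PySem.List.insert result (i : Int) '-')
  else result
termination_by result.length - i
decreasing_by simp [PySem.List.length_insert]; omega

def f (n : Int) : String :=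
  -- i = 5; result = []
  if n ≤ 0 then ""
  else
    -- result += str(n * '/') extends the (empty) list by the chars of '/'*n;
    -- then the while loop runs and ''.join(result) is returned
    String.ofList (PySem.Chars.join []
      ((fLoopA 5 ([] ++ PySem.List.pyRepeat ['/'] n)).map (fun c => [c])))

-- ===== PORT B =====
-- the while loop: append '/////', n -= 5, while n > 5; then append the remainder chunk
def fLoopB (n : Int) (chunks : List String) : List String :=
  if 5 < n then fLoopB (n - 5) (chunks ++ ["/////"])
  else chunks ++ [String.ofList (PySem.List.pyRepeat ['/'] n)]
termination_by n.toNat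
decreasing_by omega

def f_alt (n : Int) : String :=
  if n ≤ 0 then ""
  else PySem.Str.join "-" (fLoopB n [])

-- ===== PRECONDITION & SPEC =====
def Spec_f (n : Int) (out : String) : Prop := out = f_alt n
instance (n : Int) (out : String) : Decidable (Spec_f n out) := by unfold Spec_f; infer_instance

-- ===== CLAIM (what is proved, stated in full; the proofs are below) =====
def Claim_equal_f : Prop := ∀ (n : Int), Dom_f n → Spec_f n (f n)

-- ===== LEMMAS AND PROOFS =====

-- the tail produced after a dash has been inserted: '-' then up to 5 slashes, repeating
def dashTail (m : Nat) : List Char :=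
  if m = 0 then []
  else if m ≤ 5 then '-' :: List.replicate m '/'
  else '-' :: (List.replicate 5 '/' ++ dashTail (m - 5))
termination_by m

-- common normal form of both programs' results for k > 0 slashes
def tgt (k : Nat) : List Char :=
  if k ≤ 5 then List.replicate k '/' else List.replicate 5 '/' ++ dashTail (k - 5)

theorem replicate_split (m : Nat) (h : 5 ≤ m) :
    List.replicate m '/' = List.replicate 5 '/' ++ List.replicate (m - 5) '/' := by
  rw [List.replicate_append_replicate]; congr 1; omega

theorem fLoopA_spec : ∀ (m : Nat) (p : List Char),
    fLoopA p.length (p ++ List.replicate m '/') = p ++ dashTail m := by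
  intro m
  induction m using Nat.strong_induction_on with
  | _ m ih =>
    intro p
    rw [fLoopA, dashTail]
    by_cases hm : m = 0
    · subst hm; simp
    · have hlt : p.length < (p ++ List.replicate m '/').length := by
        simp; omega
      rw [if_pos hlt, if_neg hm]
      have hins : PySem.List.insert (p ++ List.replicate m '/') (p.length : Int) '-'
          = p ++ '-' :: List.replicate m '/' := by
        rw [PySem.List.insert_natCast _ _ _ (by simp)]
        simp
      rw [hins]
      by_cases h5 : m ≤ 5
      · rw [if_pos h5, fLoopA, if_neg (by simp; omega)]
      · rw [if_neg h5]
        have hsplit : p ++ '-' :: List.replicate m '/'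
            = (p ++ '-' :: List.replicate 5 '/') ++ List.replicate (m - 5) '/' := by
          rw [replicate_split m (by omega)]; simp
        have hlen : p.length + 6 = (p ++ '-' :: List.replicate 5 '/').length := by simp
        rw [hsplit, hlen, ih (m - 5) (by omega)]
        simp

theorem fLoopA_tgt (n : Int) (_hn : 0 < n) :
    fLoopA 5 (List.replicate n.toNat '/') = tgt n.toNat := by
  unfold tgt
  by_cases h5 : n.toNat ≤ 5
  · rw [if_pos h5, fLoopA, if_neg (by simp; omega)]
  · rw [if_neg h5, replicate_split n.toNat (by omega)]
    have h := fLoopA_spec (n.toNat - 5) (List.replicate 5 '/')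
    simpa using h

theorem fLoopB_acc : ∀ (k : Nat) (n : Int), n.toNat = k →
    ∀ (chunks : List String), fLoopB n chunks = chunks ++ fLoopB n [] := by
  intro k
  induction k using Nat.strong_induction_on with
  | _ k ih =>
    intro n hk chunks
    rw [fLoopB]
    by_cases h : 5 < n
    · rw [if_pos h,
        ih (n - 5).toNat (by omega) (n - 5) rfl (chunks ++ ["/////"])]
      conv_rhs => rw [fLoopB, if_pos h,
        ih (n - 5).toNat (by omega) (n - 5) rfl ([] ++ ["/////"])]
      simp
    · rw [if_neg h]
      conv_rhs => rw [fLoopB, if_neg h]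
      simp
  
theorem fLoopB_ne_nil (n : Int) : fLoopB n [] ≠ [] := by
  rw [fLoopB]
  by_cases h : 5 < n
  · rw [if_pos h, fLoopB_acc (n - 5).toNat (n - 5) rfl]; simp
  · rw [if_neg h]; simp

theorem join_cons (x y : List Char) (l : List (List Char)) :
    PySem.Chars.join ['-'] (x :: y :: l) = x ++ '-' :: PySem.Chars.join ['-'] (y :: l) := by
  simp [PySem.Chars.join, List.intercalate]

theorem tgt_step (k : Nat) (h : 5 < k) :
    tgt k = List.replicate 5 '/' ++ '-' :: tgt (k - 5) := by
  unfold tgt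
  rw [if_neg (by omega), dashTail, if_neg (by omega)]
  by_cases h2 : k - 5 ≤ 5
  · rw [if_pos h2, if_pos h2]
  · rw [if_neg h2, if_neg h2]

theorem fLoopB_spec : ∀ (k : Nat) (n : Int), n.toNat = k → 0 < n →
    PySem.Chars.join ['-'] ((fLoopB n []).map String.toList) = tgt n.toNat := by
  intro k
  induction k using Nat.strong_induction_on with
  | _ k ih =>
    intro n hk hn
    rw [fLoopB]
    by_cases h : 5 < n
    · rw [if_pos h, fLoopB_acc (n - 5).toNat (n - 5) rfl ([] ++ ["/////"])]
      obtain ⟨hd, tl, htl⟩ := List.exists_cons_of_ne_nil (fLoopB_ne_nil (n - 5))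
      rw [htl]
      simp only [List.nil_append, List.cons_append, List.map_cons]
      rw [join_cons, ← List.map_cons, ← htl,
        ih (n - 5).toNat (by omega) (n - 5) rfl (by omega)]
      have hk5 : (n - 5).toNat = n.toNat - 5 := by omega
      have hrep : ("/////" : String).toList = List.replicate 5 '/' := by decide
      rw [tgt_step n.toNat (by omega), hk5, hrep]
    · rw [if_neg h]
      unfold tgt
      rw [if_pos (by omega)]
      simp [PySem.Chars.join, List.intercalate, PySem.List.pyRepeat_singleton]

-- ===== VERDICT (by name: the statement is the Claim_ definition above) =====
theorem f_spec : Claim_equal_f := by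
  intro n _
  unfold Spec_f f f_alt
  by_cases hn : n ≤ 0
  · rw [if_pos hn, if_pos hn]
  · rw [if_neg hn, if_neg hn]
    have hn' : 0 < n := by omega
    have hA : ([] : List Char) ++ PySem.List.pyRepeat ['/'] n = List.replicate n.toNat '/' := by
      simp [PySem.List.pyRepeat_singleton]
    rw [hA, fLoopA_tgt n hn']
    have hB := fLoopB_spec n.toNat n rfl hn'
    have hjoin := PySem.Str.toList_join "-" (fLoopB n [])
    have hsep : ("-" : String).toList = ['-'] := by decide
    have htl : (PySem.Str.join "-" (fLoopB n [])).toList = tgt n.toNat := by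
      rw [hjoin, hsep, hB]
    calc String.ofList (PySem.Chars.join [] ((tgt n.toNat).map (fun c => [c])))
        = String.ofList (tgt n.toNat) := by rw [PySem.Chars.join_nil_singletons]
      _ = String.ofList (PySem.Str.join "-" (fLoopB n [])).toList := by rw [htl]
      _ = PySem.Str.join "-" (fLoopB n []) := by rw [String.ofList_toList]
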